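-- pv_equiv track=rewrite | github.com/TomWatson6/AdventOfCode | Python/2016_new/7/solution.py | part1
-- ===== SOURCE A (Python) =====
-- def parse(input: str):
--     lines = input.splitlines()
--     sequences = []
--
--     for line in lines:
--         ins = []
--         out = []
--         inside = False
--         nxt = ""
--
--         for ch in line:
--             if ch == '[':
--                 inside = True
--                 out.append(nxt)
--                 nxt = ""
--                 continue
--
--             elif ch == ']':
--                 inside = False
--                 ins.append(nxt)
--                 nxt = ""
--                 continue
--
--             nxt += ch
--
--         if inside:
--             ins.append(nxt)
--         else:
--             out.append(nxt)
--
--         sequences.append((ins, out))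
--
--     return sequences
--
-- def abba(letters):
--     for i in range(len(letters) - 3):
--         j = i + 4
--         segment = letters[i:j]
--         if segment[0] == segment[1]:
--             continue
--
--         if segment[:len(segment) // 2] == segment[len(segment) // 2:][::-1]:
--             return True
--
--     return False
--
-- def part1(input: str) -> int:
--     sequences = parse(input)
--     total = 0
--
--     for ins, out in sequences:
--         if any(abba(i) for i in ins):
--             continue
--
--         if any(abba(o) for o in out):
--             total += 1
--
--     return total
-- ===== SOURCE B (Python) =====
-- def part1(input: str) -> int:
--     total = 0
--     for line in input.splitlines():
--         inside = False
--         hyper = False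
--         sup = False
--         found = False
--         w = []  # last up to 3 characters of the current segment
--         for ch in line:
--             if ch == '[' or ch == ']':
--                 if ch == '[':
--                     sup = sup or found
--                     inside = True
--                 else:
--                     hyper = hyper or found
--                     inside = False
--                 found = False
--                 w = []
--             else:
--                 if len(w) == 3 and w[0] == ch and w[1] == w[2] and w[0] != w[1]:
--                     found = True
--                 w = (w + [ch])[-3:]
--         if inside:
--             hyper = hyper or found
--         else:
--             sup = sup or found
--         if sup and not hyper:
--             total += 1
--     return total
-- ===== Notes on version B (the rewrite author's own statement) =====
-- stated objective: alternative
-- what changed: Replaces parse-into-segment-lists plus a slice-based ABBA scan over each segment with a single streaming pass per line that keeps a sliding window of the last 3 characters and commits per-segment ABBA flags at each bracket, never materialising segments or slices.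
import Mathlib
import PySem

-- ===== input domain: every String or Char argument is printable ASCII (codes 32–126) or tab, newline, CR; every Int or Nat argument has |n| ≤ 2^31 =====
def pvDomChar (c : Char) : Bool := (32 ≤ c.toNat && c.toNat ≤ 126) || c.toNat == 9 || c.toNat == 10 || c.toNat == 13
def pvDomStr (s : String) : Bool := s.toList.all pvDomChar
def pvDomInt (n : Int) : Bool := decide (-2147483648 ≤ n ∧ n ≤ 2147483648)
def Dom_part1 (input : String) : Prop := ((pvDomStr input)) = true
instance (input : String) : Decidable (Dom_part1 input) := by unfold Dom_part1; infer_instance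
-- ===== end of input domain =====

-- B replaces A's parse-into-segment-lists plus slice-based ABBA scans by one streaming pass per
-- line with a 3-character sliding window (alternative decomposition, same asymptotic cost).

-- ===== PORT A =====
-- inner character loop of A's `parse` (state: ins, out, inside, nxt; strings built as List Char)
def stepA (st : List (List Char) × List (List Char) × Bool × List Char) (ch : Char) :
    List (List Char) × List (List Char) × Bool × List Char :=
  let (ins, out, inside, nxt) := st
  if ch = '[' then (ins, out ++ [nxt], true, ([] : List Char))
  else if ch = ']' then (ins ++ [nxt], out, false, ([] : List Char))
  else (ins, out, inside, nxt ++ [ch])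

-- per-line body of A's `parse`
def parseLine (line : List Char) : List (List Char) × List (List Char) :=
  let st := line.foldl stepA ([], [], false, [])
  let (ins, out, inside, nxt) := st
  if inside then (ins ++ [nxt], out) else (ins, out ++ [nxt])

def parse (input : String) : List (List (List Char) × List (List Char)) :=
  (PySem.Str.splitlines input).map (fun line => parseLine line.toList)

-- loop body of A's `abba` for index i (named for the proofs; same code as the Python body)
def abbaBody (letters : List Char) (i : Int) : Bool :=
  let segment := PySem.List.slice letters (some i) (some (i + 4))
  if PySem.List.pyGet? segment 0 == PySem.List.pyGet? segment 1 then false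
  else PySem.List.slice segment none (some (PySem.Int.floordiv (segment.length : Int) 2))
       == (PySem.List.slice segment (some (PySem.Int.floordiv (segment.length : Int) 2)) none).reverse

-- A's `abba`: for-loop over range(len-3) with early `return True` = .any; segment[::-1] = .reverse
def abba (letters : List Char) : Bool :=
  (PySem.List.pyRange 0 ((letters.length : Int) - 3)).any (abbaBody letters)

def part1 (input : String) : Int :=
  (parse input).foldl (fun total p =>
    if p.1.any abba then total
    else if p.2.any abba then total + 1
    else total) 0

-- ===== PORT B =====
-- `len(w) == 3 and w[0] == ch and w[1] == w[2] and w[0] != w[1]` (indexing guarded by the length test)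
def wcheck (w : List Char) (x : Char) : Bool :=
  match w with
  | [a, b, c] => a == x && b == c && !(a == b)
  | _ => false

-- inner character loop of Source B (state: inside, hyper, sup, found, w)
def stepB (st : Bool × Bool × Bool × Bool × List Char) (ch : Char) :
    Bool × Bool × Bool × Bool × List Char :=
  let (inside, hyper, sup, found, w) := st
  if ch = '[' ∨ ch = ']' then
    if ch = '[' then (true, hyper, sup || found, false, ([] : List Char))
    else (false, hyper || found, sup, false, ([] : List Char))
  else
    let found := found || wcheck w ch
    (inside, hyper, sup, found, PySem.List.slice (w ++ [ch]) (some (-3)) none)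

def part1_alt (input : String) : Int :=
  (PySem.Str.splitlines input).foldl (fun total line =>
    let st := line.toList.foldl stepB (false, false, false, false, [])
    let (inside, hyper, sup, found, _) := st
    let hyper := if inside then hyper || found else hyper
    let sup := if inside then sup else sup || found
    if sup && !hyper then total + 1 else total) 0

-- ===== PRECONDITION & SPEC =====
def Spec_part1 (input : String) (out : Int) : Prop := out = part1_alt input
instance (input : String) (out : Int) : Decidable (Spec_part1 input out) := by unfold Spec_part1; infer_instance

-- ===== CLAIM (what is proved, stated in full; the proofs are below) =====
def Claim_equal_part1 : Prop := ∀ (input : String), Dom_part1 input → Spec_part1 input (part1 input)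

-- ===== LEMMAS AND PROOFS =====

-- reference predicate: some 4-window a,b,c,d of the list has a≠b, a=d, b=c
def hasAbba : List Char → Bool
  | a :: b :: c :: d :: t => (if a == b then false else (a == d && b == c)) || hasAbba (b :: c :: d :: t)
  | _ => false

-- last (up to) 3 elements
def lw (l : List Char) : List Char := l.drop (l.length - 3)

theorem slice_neg3 (l : List Char) : PySem.List.slice l (some (-3)) none = lw l := by
  simp [PySem.List.slice, lw]

theorem lw_cons4 (a b c d : Char) (t : List Char) :
    lw (a :: b :: c :: d :: t) = lw (b :: c :: d :: t) := by
  simp only [lw, List.length_cons]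
  rw [show t.length + 1 + 1 + 1 + 1 - 3 = (t.length + 1 + 1 + 1 - 3) + 1 by omega,
      List.drop_succ_cons]

theorem lw_lw (l : List Char) (x : Char) : lw (lw l ++ [x]) = lw (l ++ [x]) := by
  match l with
  | [] => simp [lw]
  | [a] => simp [lw]
  | [a, b] => simp [lw]
  | [a, b, c] => simp [lw]
  | a :: b :: c :: d :: t =>
      have ih := lw_lw (b :: c :: d :: t) x
      show lw (lw (a::b::c::d::t) ++ [x]) = lw (a::b::c::d::(t++[x]))
      rw [lw_cons4 a b c d t, ih]
      rw [lw_cons4 a b c d (t++[x])]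
      rfl

theorem hasAbba_append (l : List Char) (x : Char) :
    hasAbba (l ++ [x]) = (hasAbba l || wcheck (lw l) x) := by
  match l with
  | [] => simp [hasAbba, wcheck, lw]
  | [a] => simp [hasAbba, wcheck, lw]
  | [a, b] => simp [hasAbba, wcheck, lw]
  | [a, b, c] =>
      simp only [List.cons_append, List.nil_append, hasAbba, wcheck, lw]
      cases h : a == b <;> simp [h]
  | a :: b :: c :: d :: t =>
      have ih := hasAbba_append (b :: c :: d :: t) x
      simp only [List.cons_append] at *
      rw [hasAbba, ih, hasAbba, lw_cons4, Bool.or_assoc]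

theorem abbaBody_zero (a b c d : Char) (t : List Char) :
    abbaBody (a :: b :: c :: d :: t) 0 = (if a == b then false else (a == d && b == c)) := by
  have hseg : PySem.List.slice (a :: b :: c :: d :: t) (some 0) (some 4) = [a, b, c, d] := by
    have := PySem.List.slice_natCast (a :: b :: c :: d :: t) 0 4
    simpa using this
  simp only [abbaBody, show (0:Int)+4 = 4 from rfl, hseg]
  norm_num [PySem.List.pyGet?, PySem.List.pyIdx?, PySem.Int.floordiv, PySem.List.slice]
  cases h : a == b <;> simp [Bool.and_comm]

theorem abbaBody_succ (x : Char) (l : List Char) (i : Nat) :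
    abbaBody (x :: l) ((i : Int) + 1) = abbaBody l (i : Int) := by
  have hseg : PySem.List.slice (x :: l) (some ((i:Int)+1)) (some ((i:Int)+1+4))
      = PySem.List.slice l (some (i:Int)) (some ((i:Int)+4)) := by
    have h1 := PySem.List.slice_natCast (x :: l) (i+1) (i+5)
    have h2 := PySem.List.slice_natCast l i (i+4)
    push_cast at h1 h2
    rw [show (i:Int)+1+4 = (i:Int)+5 by ring, h1, h2]
    simp [List.drop_succ_cons]
  rw [abbaBody, abbaBody, hseg]

theorem abba_range (l : List Char) :
    abba l = (List.range (l.length - 3)).any (fun k => abbaBody l (k : Int)) := by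
  rcases Nat.le_total l.length 3 with h | h
  · have h2 : l.length - 3 = 0 := by omega
    rw [abba, h2]
    have : PySem.List.pyRange 0 ((l.length : Int) - 3) = [] := by
      simp [PySem.List.pyRange]
      omega
    rw [this]
    rfl
  · have : (l.length : Int) - 3 = ((l.length - 3 : Nat) : Int) := by push_cast [h]; ring
    rw [abba, this, PySem.List.pyRange_zero_natCast, List.any_map]
    rfl

theorem abba_eq (l : List Char) : abba l = hasAbba l := by
  match l with
  | [] => rfl
  | [a] => rfl
  | [a, b] => rfl
  | [a, b, c] => rfl
  | a :: b :: c :: d :: t =>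
      have ih := abba_eq (b :: c :: d :: t)
      rw [abba_range] at ih ⊢
      have hl : (a :: b :: c :: d :: t).length - 3 = ((b :: c :: d :: t).length - 3) + 1 := by
        simp
      rw [hl, List.range_succ_eq_map, List.any_cons, List.any_map, hasAbba, ← ih]
      have h0 : abbaBody (a :: b :: c :: d :: t) ((0 : Nat) : Int)
          = (if a == b then false else (a == d && b == c)) := by
        rw [Nat.cast_zero, abbaBody_zero]
      have h2 : (List.range ((b :: c :: d :: t).length - 3)).any
            ((fun (k : Nat) => abbaBody (a :: b :: c :: d :: t) ((k : Int))) ∘ Nat.succ)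
          = (List.range ((b :: c :: d :: t).length - 3)).any
            (fun k => abbaBody (b :: c :: d :: t) (k : Int)) := by
        refine List.any_congr rfl ?_
        intro k
        show abbaBody (a :: b :: c :: d :: t) ((k.succ : Nat) : Int) = abbaBody (b :: c :: d :: t) (k : Int)
        push_cast
        exact abbaBody_succ a (b :: c :: d :: t) k
      rw [h0, h2]

theorem any_abba_eq (xs : List (List Char)) : xs.any abba = xs.any hasAbba :=
  List.any_congr rfl (fun a => abba_eq a)

-- invariant relating the two character loops
theorem fold_rel (cs : List Char) (ins out : List (List Char)) (inside : Bool) (nxt : List Char) :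
    cs.foldl stepB (inside, ins.any hasAbba, out.any hasAbba, hasAbba nxt, lw nxt)
    = ((cs.foldl stepA (ins, out, inside, nxt)).2.2.1,
       (cs.foldl stepA (ins, out, inside, nxt)).1.any hasAbba,
       (cs.foldl stepA (ins, out, inside, nxt)).2.1.any hasAbba,
       hasAbba (cs.foldl stepA (ins, out, inside, nxt)).2.2.2,
       lw (cs.foldl stepA (ins, out, inside, nxt)).2.2.2) := by
  induction cs generalizing ins out inside nxt with
  | nil => rfl
  | cons ch cs ih =>
      simp only [List.foldl_cons]
      by_cases h1 : ch = '['
      · have hA : stepA (ins, out, inside, nxt) ch = (ins, out ++ [nxt], true, []) := by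
          simp [stepA, h1]
        have hB : stepB (inside, ins.any hasAbba, out.any hasAbba, hasAbba nxt, lw nxt) ch
            = (true, ins.any hasAbba, (out ++ [nxt]).any hasAbba, hasAbba ([] : List Char), lw []) := by
          simp [stepB, h1, lw, hasAbba, List.any_append]
        rw [hA, hB]
        exact ih ins (out ++ [nxt]) true []
      · by_cases h2 : ch = ']'
        · have hA : stepA (ins, out, inside, nxt) ch = (ins ++ [nxt], out, false, []) := by
            simp [stepA, h2]
          have hB : stepB (inside, ins.any hasAbba, out.any hasAbba, hasAbba nxt, lw nxt) ch
              = (false, (ins ++ [nxt]).any hasAbba, out.any hasAbba, hasAbba ([] : List Char), lw []) := by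
            simp [stepB, h2, lw, hasAbba, List.any_append]
          rw [hA, hB]
          exact ih (ins ++ [nxt]) out false []
        · have hA : stepA (ins, out, inside, nxt) ch = (ins, out, inside, nxt ++ [ch]) := by
            simp [stepA, h1, h2]
          have hB : stepB (inside, ins.any hasAbba, out.any hasAbba, hasAbba nxt, lw nxt) ch
              = (inside, ins.any hasAbba, out.any hasAbba, hasAbba (nxt ++ [ch]), lw (nxt ++ [ch])) := by
            show (if ch = '[' ∨ ch = ']' then _ else _) = _
            rw [if_neg (by simp [h1, h2])]
            rw [slice_neg3, lw_lw, hasAbba_append]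
          rw [hA, hB]
          exact ih ins out inside (nxt ++ [ch])

-- per-line agreement of the two loop bodies
theorem line_eq (line : List Char) (total : Int) :
    (let st := line.foldl stepB (false, false, false, false, [])
     let (inside, hyper, sup, found, _) := st
     let hyper := if inside then hyper || found else hyper
     let sup := if inside then sup else sup || found
     if sup && !hyper then total + 1 else total)
    = (if (parseLine line).1.any abba then total
       else if (parseLine line).2.any abba then total + 1
       else total) := by
  have h := fold_rel line [] [] false []
  simp only [List.any_nil] at h
  show (let st := line.foldl stepB (false, false, false, false, []); _) = _
  rw [show (false, false, false, false, ([] : List Char))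
        = (false, false, false, hasAbba [], lw []) from rfl, h]
  rw [parseLine, any_abba_eq, any_abba_eq]
  rcases line.foldl stepA ([], [], false, []) with ⟨ins, out, inside, nxt⟩
  cases inside <;>
    simp only [Bool.false_eq_true, if_false, if_true, List.any_append, List.any_cons,
      List.any_nil, Bool.or_false] <;>
  · cases h1 : List.any ins hasAbba <;> cases h2 : List.any out hasAbba <;>
      cases h3 : hasAbba nxt <;> simp

theorem folds_eq (lines : List String) (t : Int) :
    lines.foldl (fun total line =>
      let st := line.toList.foldl stepB (false, false, false, false, [])
      let (inside, hyper, sup, found, _) := st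
      let hyper := if inside then hyper || found else hyper
      let sup := if inside then sup else sup || found
      if sup && !hyper then total + 1 else total) t
    = lines.foldl (fun total line =>
        if (parseLine line.toList).1.any abba then total
        else if (parseLine line.toList).2.any abba then total + 1
        else total) t := by
  induction lines generalizing t with
  | nil => rfl
  | cons line rest ih =>
      rw [List.foldl_cons, List.foldl_cons]
      refine (ih _).trans ?_
      exact congrArg (fun z => rest.foldl (fun total line =>
          if (parseLine line.toList).1.any abba then total
          else if (parseLine line.toList).2.any abba then total + 1
          else total) z) (line_eq line.toList t)

theorem part1_spec : Claim_equal_part1 := by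
  intro input _
  show part1 input = part1_alt input
  rw [part1, part1_alt, parse, List.foldl_map]
  exact (folds_eq (PySem.Str.splitlines input) 0).symm
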